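-- pv_equiv track=rewrite | github.com/gw-systems/saral-erp-riteshraj | projects/management/commands/export_schema.py | categorize_tables
-- ===== SOURCE A (Python) =====
-- def categorize_tables(tables):
--     """Categorize tables for better organization"""
--     categories = {
--         "👥 User & Authentication": [],
--         "📦 Projects & Clients": [],
--         "🏢 Vendors & Warehouses": [],
--         "⚙️ Operations": [],
--         "💰 Finance & Billing": [],
--         "🔧 System & Configuration": [],
--         "📋 Other": []
--     }
--
--     for table in tables:
--         if 'user' in table or 'auth' in table or 'account' in table:
--             categories["👥 User & Authentication"].append(table)
--         elif 'project' in table or 'client' in table: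
--             categories["📦 Projects & Clients"].append(table)
--         elif 'vendor' in table or 'warehouse' in table:
--             categories["🏢 Vendors & Warehouses"].append(table)
--         elif 'operation' in table or 'daily' in table or 'mis' in table or 'dispute' in table:
--             categories["⚙️ Operations"].append(table)
--         elif 'billing' in table or 'invoice' in table or 'payment' in table or 'adhoc' in table:
--             categories["💰 Finance & Billing"].append(table)
--         elif 'setting' in table or 'config' in table or 'location' in table or 'gst' in table or 'city' in table:
--             categories["🔧 System & Configuration"].append(table)
--         else:
--             categories["📋 Other"].append(table)
--
--     # Remove empty categories
--     return {k: v for k, v in categories.items() if v}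
-- ===== SOURCE B (Python) =====
-- _RULES = [
--     ("\U0001F465 User & Authentication", ("user", "auth", "account")),
--     ("\U0001F4E6 Projects & Clients", ("project", "client")),
--     ("\U0001F3E2 Vendors & Warehouses", ("vendor", "warehouse")),
--     ("\u2699\uFE0F Operations", ("operation", "daily", "mis", "dispute")),
--     ("\U0001F4B0 Finance & Billing", ("billing", "invoice", "payment", "adhoc")),
--     ("\U0001F527 System & Configuration", ("setting", "config", "location", "gst", "city")),
-- ]
--
--
-- def _sieve(rules, remaining):
--     """Recursively sieve: peel off the tables matching the first rule, recurse on the rest."""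
--     if not rules:
--         return {"\U0001F4CB Other": remaining} if remaining else {}
--     (name, kws) = rules[0]
--     matched = [t for t in remaining if any(k in t for k in kws)]
--     unmatched = [t for t in remaining if not any(k in t for k in kws)]
--     out = {name: matched} if matched else {}
--     out.update(_sieve(rules[1:], unmatched))
--     return out
--
--
-- def categorize_tables(tables):
--     """Categorize tables for better organization"""
--     return _sieve(_RULES, list(tables))
-- ===== Notes on version B (the rewrite author's own statement) =====
-- stated objective: alternative
-- what changed: Replaces A's single loop over tables (per-table elif classification into a pre-filled dict, then dropping empty keys) by a recursive sieve over the category rules: each stage partitions the remaining tables into matched/unmatched for that one category and recurses on the unmatched, the final residue becoming 'Other'; empty buckets are never created.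
import Mathlib
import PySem

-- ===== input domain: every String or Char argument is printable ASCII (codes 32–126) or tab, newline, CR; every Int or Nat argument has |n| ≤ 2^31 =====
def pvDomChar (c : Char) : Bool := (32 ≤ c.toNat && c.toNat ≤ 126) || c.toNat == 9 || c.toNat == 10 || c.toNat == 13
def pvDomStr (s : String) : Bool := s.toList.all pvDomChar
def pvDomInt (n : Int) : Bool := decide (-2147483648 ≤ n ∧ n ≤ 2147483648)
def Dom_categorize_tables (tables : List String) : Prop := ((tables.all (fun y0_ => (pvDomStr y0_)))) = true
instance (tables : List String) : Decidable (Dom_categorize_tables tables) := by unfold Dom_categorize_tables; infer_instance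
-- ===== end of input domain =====

-- B replaces A's per-table elif loop by a recursive per-category sieve over the rules,
-- partitioning the remaining tables at each stage (objective: alternative decomposition).


-- ===== PORT A =====
def categorize_tables (tables : List String) : List (String × List String) :=
  (tables.foldl (fun d table =>
    if PySem.Str.isIn "user" table || PySem.Str.isIn "auth" table || PySem.Str.isIn "account" table then
      d.modify "👥 User & Authentication" [] (· ++ [table])
    else if PySem.Str.isIn "project" table || PySem.Str.isIn "client" table then
      d.modify "📦 Projects & Clients" [] (· ++ [table])
    else if PySem.Str.isIn "vendor" table || PySem.Str.isIn "warehouse" table then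
      d.modify "🏢 Vendors & Warehouses" [] (· ++ [table])
    else if PySem.Str.isIn "operation" table || PySem.Str.isIn "daily" table || PySem.Str.isIn "mis" table || PySem.Str.isIn "dispute" table then
      d.modify "⚙️ Operations" [] (· ++ [table])
    else if PySem.Str.isIn "billing" table || PySem.Str.isIn "invoice" table || PySem.Str.isIn "payment" table || PySem.Str.isIn "adhoc" table then
      d.modify "💰 Finance & Billing" [] (· ++ [table])
    else if PySem.Str.isIn "setting" table || PySem.Str.isIn "config" table || PySem.Str.isIn "location" table || PySem.Str.isIn "gst" table || PySem.Str.isIn "city" table then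
      d.modify "🔧 System & Configuration" [] (· ++ [table])
    else
      d.modify "📋 Other" [] (· ++ [table]))
    (PySem.Dict.ofList
      [("👥 User & Authentication", []), ("📦 Projects & Clients", []),
       ("🏢 Vendors & Warehouses", []), ("⚙️ Operations", []),
       ("💰 Finance & Billing", []), ("🔧 System & Configuration", []), ("📋 Other", [])])
  -- {k: v for k, v in categories.items() if v}: keys are unique, so the result dict's items
  -- are exactly the nonempty items in order
  ).items.filter (fun p => !p.2.isEmpty)

-- ===== PORT B =====
def pvRules : List (String × List String) :=
  [("👥 User & Authentication", ["user", "auth", "account"]),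
   ("📦 Projects & Clients", ["project", "client"]),
   ("🏢 Vendors & Warehouses", ["vendor", "warehouse"]),
   ("⚙️ Operations", ["operation", "daily", "mis", "dispute"]),
   ("💰 Finance & Billing", ["billing", "invoice", "payment", "adhoc"]),
   ("🔧 System & Configuration", ["setting", "config", "location", "gst", "city"])]

-- _sieve(rules, remaining): recursion on rules; '{name: matched} then out.update(recursive dict)'
-- is exactly list append here because the recursive call's keys are all fresh (rule names and
-- "Other" are pairwise distinct)
def pvSieve (rules : List (String × List String)) (remaining : List String) : List (String × List String) :=
  match rules with
  | [] => if remaining.isEmpty then [] else [("📋 Other", remaining)]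
  | (name, kws) :: rest =>
    let matched := remaining.filter (fun t => kws.any (fun k => PySem.Str.isIn k t))
    let unmatched := remaining.filter (fun t => !kws.any (fun k => PySem.Str.isIn k t))
    (if matched.isEmpty then [] else [(name, matched)]) ++ pvSieve rest unmatched

def categorize_tables_alt (tables : List String) : List (String × List String) :=
  pvSieve pvRules tables

-- ===== PRECONDITION & SPEC =====
def Spec_categorize_tables (tables : List String) (out : List (String × List String)) : Prop := out = categorize_tables_alt tables
instance (tables : List String) (out : List (String × List String)) : Decidable (Spec_categorize_tables tables out) := by unfold Spec_categorize_tables; infer_instance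

-- ===== CLAIM (what is proved, stated in full; the proofs are below) =====
def Claim_equal_categorize_tables : Prop := ∀ (tables : List String), Dom_categorize_tables tables → Spec_categorize_tables tables (categorize_tables tables)

-- ===== LEMMAS AND PROOFS =====

-- the category a table lands in under a first-match scan of the rules (proof device shared
-- by both characterizations; neither port computes it)
def pvCategory (rules : List (String × List String)) (table : String) : String :=
  match rules with
  | [] => "📋 Other"
  | (name, kws) :: rest =>
    if kws.any (fun k => PySem.Str.isIn k table) then name else pvCategory rest table

def pvOrder : List String := pvRules.map (·.1) ++ ["📋 Other"]

def pvInitD : PySem.Dict String (List String) := PySem.Dict.ofList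
  [("👥 User & Authentication", []), ("📦 Projects & Clients", []),
   ("🏢 Vendors & Warehouses", []), ("⚙️ Operations", []),
   ("💰 Finance & Billing", []), ("🔧 System & Configuration", []), ("📋 Other", [])]

def pvBody (d : PySem.Dict String (List String)) (t : String) : PySem.Dict String (List String) :=
  d.modify (pvCategory pvRules t) [] (fun v => v ++ [t])

-- A's elif chain computes the same category as a first-match rule scan
theorem pvCategory_eq (t : String) :
    pvCategory pvRules t =
      (if PySem.Str.isIn "user" t || PySem.Str.isIn "auth" t || PySem.Str.isIn "account" t then "👥 User & Authentication"
       else if PySem.Str.isIn "project" t || PySem.Str.isIn "client" t then "📦 Projects & Clients"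
       else if PySem.Str.isIn "vendor" t || PySem.Str.isIn "warehouse" t then "🏢 Vendors & Warehouses"
       else if PySem.Str.isIn "operation" t || PySem.Str.isIn "daily" t || PySem.Str.isIn "mis" t || PySem.Str.isIn "dispute" t then "⚙️ Operations"
       else if PySem.Str.isIn "billing" t || PySem.Str.isIn "invoice" t || PySem.Str.isIn "payment" t || PySem.Str.isIn "adhoc" t then "💰 Finance & Billing"
       else if PySem.Str.isIn "setting" t || PySem.Str.isIn "config" t || PySem.Str.isIn "location" t || PySem.Str.isIn "gst" t || PySem.Str.isIn "city" t then "🔧 System & Configuration"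
       else "📋 Other") := by
  simp [pvCategory, pvRules, List.any, Bool.or_assoc]

theorem pvCategory_mem (t : String) : pvCategory pvRules t ∈ pvInitD.keys := by
  rw [pvCategory_eq t]; split_ifs <;> decide

theorem pvKeys_d1 (tables : List String) :
    (tables.foldl pvBody pvInitD).keys = pvInitD.keys := by
  have h := PySem.Dict.keys_foldl_modify_key tables (fun t => pvCategory pvRules t)
    ([] : List String) (fun _ t v => v ++ [t]) pvInitD
  have h2 : PySem.Set.update pvInitD.keys (tables.map (fun t => pvCategory pvRules t))
      = pvInitD.keys := by
    rw [PySem.Set.update_eq_append_filter]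
    have : (PySem.Set.ofList (tables.map (fun t => pvCategory pvRules t))).filter
        (fun y => !PySem.Set.contains pvInitD.keys y) = [] := by
      rw [List.filter_eq_nil_iff]
      intro y hy
      have hy' : y ∈ tables.map (fun t => pvCategory pvRules t) := (PySem.Set.mem_ofList _ _).mp hy
      obtain ⟨t, _, rfl⟩ := List.mem_map.mp hy'
      simp [pvCategory_mem t]
    rw [this, List.append_nil]
  exact h.trans h2

theorem pvMapSndFilter (g : String → String) (tables : List String) (k : String) :
    List.map (fun x => x.2) (List.filter (fun p => p.1 == k) (tables.map (fun t => (g t, t)))) =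
    List.filter (fun t => g t == k) tables := by
  induction tables with
  | nil => rfl
  | cons t ts ih =>
    simp only [List.map_cons, List.filter_cons]
    by_cases h : g t == k <;> simp [h, ih]

theorem pvGetD_d1 (tables : List String) (k : String) (hk : pvInitD.getD k [] = []) :
    (tables.foldl pvBody pvInitD).getD k [] =
      tables.filter (fun t => pvCategory pvRules t == k) := by
  have h := PySem.Dict.getD_foldl_modify_append
    (tables.map (fun t => (pvCategory pvRules t, t))) pvInitD k
  simp only [List.foldl_map] at h
  have hfold : tables.foldl pvBody pvInitD =
      tables.foldl (fun x t => PySem.Dict.modify x (pvCategory pvRules t, t).1 []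
        (fun v => v ++ [(pvCategory pvRules t, t).2])) pvInitD := rfl
  rw [hfold, h, hk, List.nil_append, pvMapSndFilter]

theorem pvItems_d1 (tables : List String) :
    (tables.foldl pvBody pvInitD).items =
      pvOrder.map (fun k => (k, tables.filter (fun t => pvCategory pvRules t == k))) := by
  have hnd : (tables.foldl pvBody pvInitD).keys.Nodup := by
    rw [pvKeys_d1]; decide
  rw [PySem.Dict.items_eq_map_keys _ hnd ([] : List String), pvKeys_d1]
  have hord : pvInitD.keys = pvOrder := by decide
  rw [hord]
  apply List.map_congr_left
  intro k hk
  have hinit : pvInitD.getD k [] = [] := by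
    fin_cases hk <;> rfl
  rw [pvGetD_d1 tables k hinit]

-- where a first-match scan can send a table
theorem pvCategory_mem_or (rules : List (String × List String)) (t : String) :
    pvCategory rules t ∈ rules.map (·.1) ++ ["📋 Other"] := by
  induction rules with
  | nil => simp [pvCategory]
  | cons r rest ih =>
    obtain ⟨name, kws⟩ := r
    simp only [pvCategory, List.map_cons, List.cons_append, List.mem_cons]
    split_ifs with h
    · exact Or.inl rfl
    · exact Or.inr ih

-- the sieve over any admissible rule list computes, per category in order, exactly the
-- tables whose first matching rule is that category, dropping empty buckets
theorem pvSieve_char (rules : List (String × List String)) (rem : List String)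
    (hnd : (rules.map (·.1)).Nodup) (hoth : "📋 Other" ∉ rules.map (·.1)) :
    pvSieve rules rem =
      ((rules.map (·.1) ++ ["📋 Other"]).map
        (fun k => (k, rem.filter (fun t => pvCategory rules t == k)))).filter
        (fun p => !p.2.isEmpty) := by
  induction rules generalizing rem with
  | nil =>
    simp only [pvSieve, List.map_nil, List.nil_append, List.map_cons, List.map_nil,
      List.filter_cons, List.filter_nil]
    have : rem.filter (fun t => pvCategory [] t == "📋 Other") = rem := by
      apply List.filter_eq_self.mpr; intro t _; simp [pvCategory]
    rw [this]
    by_cases h : rem.isEmpty <;> simp [h]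
  | cons r rest ih =>
    obtain ⟨name, kws⟩ := r
    simp only [List.map_cons, List.mem_cons] at hnd hoth ⊢
    have hname_rest : name ∉ rest.map (·.1) := (List.nodup_cons.mp hnd).1
    have hnd' : (rest.map (·.1)).Nodup := (List.nodup_cons.mp hnd).2
    have hoth' : "📋 Other" ∉ rest.map (·.1) := fun h => hoth (Or.inr h)
    have hname_oth : name ≠ "📋 Other" := fun h => hoth (Or.inl h.symm)
    simp only [pvSieve, List.cons_append, List.map_cons, List.filter_cons]
    have hp : ∀ t, ((pvCategory ((name, kws) :: rest) t == name) : Bool) =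
        kws.any (fun k => PySem.Str.isIn k t) := by
      intro t
      simp only [pvCategory]
      split_ifs with h
      · rw [h]; simp
      · have hmem := pvCategory_mem_or rest t
        have hne : pvCategory rest t ≠ name := by
          intro he; rw [he] at hmem
          rcases List.mem_append.mp hmem with h1 | h2
          · exact hname_rest h1
          · simp only [List.mem_singleton] at h2; exact hname_oth h2
        rw [Bool.not_eq_true] at h
        rw [h]
        simp [hne]
    have hhead : rem.filter (fun t => pvCategory ((name, kws) :: rest) t == name) =
        rem.filter (fun t => kws.any (fun k => PySem.Str.isIn k t)) :=
      List.filter_congr (fun t _ => hp t)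
    have htail : ∀ k ∈ rest.map (·.1) ++ ["📋 Other"],
        rem.filter (fun t => pvCategory ((name, kws) :: rest) t == k) =
          (rem.filter (fun t => !kws.any (fun k => PySem.Str.isIn k t))).filter
            (fun t => pvCategory rest t == k) := by
      intro k hk
      have hkname : k ≠ name := by
        intro he; subst he
        rcases List.mem_append.mp hk with h1 | h2
        · exact hname_rest h1
        · simp at h2; exact hname_oth h2
      rw [List.filter_filter]
      apply List.filter_congr
      intro t _
      simp only [pvCategory]
      split_ifs with h
      · rw [h]; simp [Ne.symm hkname]
      · rw [Bool.not_eq_true] at h; rw [h]; simp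
    have hmapc : (rest.map (·.1) ++ ["📋 Other"]).map
          (fun k => (k, rem.filter (fun t => pvCategory ((name, kws) :: rest) t == k))) =
        (rest.map (·.1) ++ ["📋 Other"]).map
          (fun k => (k, (rem.filter (fun t => !kws.any (fun k => PySem.Str.isIn k t))).filter
            (fun t => pvCategory rest t == k))) :=
      List.map_congr_left (fun k hk => by rw [htail k hk])
    rw [hhead, hmapc, ← ih _ hnd' hoth']
    by_cases h : (rem.filter (fun t => kws.any (fun k => PySem.Str.isIn k t))) = []
    · rw [h]; simp
    · split_ifs with h1 h2 <;> simp_all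

theorem categorize_tables_spec' (tables : List String) :
    categorize_tables tables = categorize_tables_alt tables := by
  unfold categorize_tables categorize_tables_alt
  have hbody : ∀ (acc : PySem.Dict String (List String)), ∀ t ∈ tables,
      (if PySem.Str.isIn "user" t || PySem.Str.isIn "auth" t || PySem.Str.isIn "account" t then
        acc.modify "👥 User & Authentication" [] (· ++ [t])
      else if PySem.Str.isIn "project" t || PySem.Str.isIn "client" t then
        acc.modify "📦 Projects & Clients" [] (· ++ [t])
      else if PySem.Str.isIn "vendor" t || PySem.Str.isIn "warehouse" t then
        acc.modify "🏢 Vendors & Warehouses" [] (· ++ [t])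
      else if PySem.Str.isIn "operation" t || PySem.Str.isIn "daily" t || PySem.Str.isIn "mis" t || PySem.Str.isIn "dispute" t then
        acc.modify "⚙️ Operations" [] (· ++ [t])
      else if PySem.Str.isIn "billing" t || PySem.Str.isIn "invoice" t || PySem.Str.isIn "payment" t || PySem.Str.isIn "adhoc" t then
        acc.modify "💰 Finance & Billing" [] (· ++ [t])
      else if PySem.Str.isIn "setting" t || PySem.Str.isIn "config" t || PySem.Str.isIn "location" t || PySem.Str.isIn "gst" t || PySem.Str.isIn "city" t then
        acc.modify "🔧 System & Configuration" [] (· ++ [t])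
      else acc.modify "📋 Other" [] (· ++ [t])) = pvBody acc t := by
    intro acc t _
    unfold pvBody
    rw [pvCategory_eq t]
    split_ifs <;> rfl
  have hlit : PySem.Dict.ofList
      [("👥 User & Authentication", ([] : List String)), ("📦 Projects & Clients", []),
       ("🏢 Vendors & Warehouses", []), ("⚙️ Operations", []),
       ("💰 Finance & Billing", []), ("🔧 System & Configuration", []), ("📋 Other", [])] = pvInitD := rfl
  rw [hlit, PySem.List.foldl_congr_mem tables _ pvBody pvInitD hbody, pvItems_d1,
    pvSieve_char pvRules tables (by decide) (by decide)]
  rfl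

-- ===== VERDICT (by name: the statement is the Claim_ definition above) =====
theorem categorize_tables_spec : Claim_equal_categorize_tables := by
  intro tables _
  exact categorize_tables_spec' tables
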